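-- pv_equiv track=rewrite | github.com/fabiopicolijr/python-scripts | run_check_behave_order.py | group_lines_with_at_symbol
-- ===== SOURCE A (Python) =====
-- def group_lines_with_at_symbol(lines):
--     line_groups = {}
--     current_group = []
--     last_register = None
--
--     for line in lines:
--         if line.startswith("@"):
--             current_group.append(line)
--             last_register = line
--         elif current_group:
--             if len(current_group) > 1:
--                 current_group = current_group[:-1]
--             line_groups[last_register] = current_group
--             current_group = []
--             last_register = None
--
--     return line_groups
-- ===== SOURCE B (Python) =====
-- def group_lines_with_at_symbol(lines):
--     # Phase 1: index-scan: collect each maximal run of consecutive "@"-lines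
--     # that is followed by a non-"@" line (a trailing run is never finalized).
--     runs = []
--     i, n = 0, len(lines)
--     while i < n:
--         if lines[i].startswith("@"):
--             j = i + 1
--             while j < n and lines[j].startswith("@"):
--                 j += 1
--             if j < n:
--                 runs.append(lines[i:j])
--             i = j
--         else:
--             i += 1
--     # Phase 2: build the dict in one comprehension (last-wins on duplicate keys).
--     return {run[-1]: run[:-1] if len(run) > 1 else run for run in runs}
-- ===== Notes on version B (the rewrite author's own statement) =====
-- stated objective: alternative
-- what changed: A is a single-pass state machine carrying a dict, a pending group and a last-register variable; B first index-scans the list extracting each maximal '@'-run followed by a non-'@' line as a slice, then builds the dict in one comprehension.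
import Mathlib
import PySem

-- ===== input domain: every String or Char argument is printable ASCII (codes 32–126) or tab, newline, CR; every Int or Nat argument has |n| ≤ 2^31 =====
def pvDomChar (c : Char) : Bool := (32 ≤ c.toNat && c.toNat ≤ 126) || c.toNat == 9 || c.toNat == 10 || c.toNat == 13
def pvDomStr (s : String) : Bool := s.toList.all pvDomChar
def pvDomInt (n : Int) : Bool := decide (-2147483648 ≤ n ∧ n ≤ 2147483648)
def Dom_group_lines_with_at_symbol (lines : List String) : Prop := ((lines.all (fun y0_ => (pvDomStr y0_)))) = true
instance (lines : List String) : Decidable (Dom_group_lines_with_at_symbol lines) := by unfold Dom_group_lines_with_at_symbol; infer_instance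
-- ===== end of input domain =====

-- B replaces A's inline dict/last-register state machine by a two-phase index scan
-- (extract finalized '@'-runs as slices, then one dict comprehension): alternative decomposition, same cost.


-- ===== PORT A =====
-- one step of A's for-loop over (line_groups, current_group, last_register)
def pvStepA (st : PySem.Dict String (List String) × List String × Option String)
    (line : String) : PySem.Dict String (List String) × List String × Option String :=
  if PySem.Str.startswith line "@" then
    (st.1, st.2.1 ++ [line], some line)
  else if st.2.1 ≠ [] then
    let cur := if st.2.1.length > 1 then PySem.List.slice st.2.1 none (some (-1)) else st.2.1
    (match st.2.2 with
     | some r => st.1.insert r cur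
     | none => st.1,  -- unreachable: current_group nonempty implies last_register set
     [], none)
  else st

def group_lines_with_at_symbol (lines : List String) : List (String × List String) :=
  (lines.foldl pvStepA (PySem.Dict.empty, [], none)).1.items

-- ===== PORT B =====
def pvStartsAt (s : String) : Bool := PySem.Str.startswith s "@"

-- inner while loop: advance j while j < n and lines[j].startswith("@");
-- fuel (called with n ≥ n - j) only makes the loop structurally total
def pvAdvance (lines : List String) (n : Nat) : Nat → Nat → Nat
  | 0, j => j
  | fuel + 1, j =>
    if j < n ∧ pvStartsAt (lines.getD j "") then pvAdvance lines n fuel (j + 1) else j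

-- outer while loop over the index i, collecting the runs; fuel (called with n ≥ n - i) only
-- makes the loop structurally total (lines[j] with j < n = lines.length is exact as lines.getD j "")
def pvScan (lines : List String) (n : Nat) : Nat → Nat → List (List String)
  | 0, _ => []
  | fuel + 1, i =>
    if i < n then
      if pvStartsAt (lines.getD i "") then
        let j := pvAdvance lines n n (i + 1)
        (if j < n then [PySem.List.slice lines (some (i : Int)) (some (j : Int))] else [])
          ++ pvScan lines n fuel j
      else pvScan lines n fuel (i + 1)
    else []

-- run[-1] (run is always nonempty here) and run[:-1], dict comprehension as a fold of inserts
def group_lines_with_at_symbol_alt (lines : List String) : List (String × List String) :=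
  let runs := pvScan lines lines.length lines.length 0
  (runs.foldl
    (fun (d : PySem.Dict String (List String)) run =>
      d.insert ((PySem.List.pyGet? run (-1)).getD "")
        (if run.length > 1 then PySem.List.slice run none (some (-1)) else run))
    PySem.Dict.empty).items

-- ===== PRECONDITION & SPEC =====
def Spec_group_lines_with_at_symbol (lines : List String) (out : List (String × List String)) : Prop := out = group_lines_with_at_symbol_alt lines
instance (lines : List String) (out : List (String × List String)) : Decidable (Spec_group_lines_with_at_symbol lines out) := by unfold Spec_group_lines_with_at_symbol; infer_instance

-- ===== CLAIM (what is proved, stated in full; the proofs are below) =====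
def Claim_equal_group_lines_with_at_symbol : Prop := ∀ (lines : List String), Dom_group_lines_with_at_symbol lines → Spec_group_lines_with_at_symbol lines (group_lines_with_at_symbol lines)

-- ===== LEMMAS AND PROOFS =====

-- common intermediate: A's state machine written as recursion over the remaining lines,
-- with the pending group as a parameter
def pvRunsP : List String → List String → List (List String)
  | _, [] => []
  | cur, l :: rest =>
    if pvStartsAt l then pvRunsP (cur ++ [l]) rest
    else if cur = [] then pvRunsP [] rest
    else cur :: pvRunsP [] rest

-- the insertion both sides perform for a (nonempty) finalized run
def pvIns (d : PySem.Dict String (List String)) (run : List String) :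
    PySem.Dict String (List String) :=
  d.insert ((PySem.List.pyGet? run (-1)).getD "")
    (if run.length > 1 then PySem.List.slice run none (some (-1)) else run)

theorem pvFoldA_eq (lines : List String) : ∀ (d : PySem.Dict String (List String))
    (cur : List String),
    (lines.foldl pvStepA (d, cur, cur.getLast?)).1 = (pvRunsP cur lines).foldl pvIns d := by
  induction lines with
  | nil => intro d cur; simp [pvRunsP]
  | cons l rest ih =>
    intro d cur
    simp only [List.foldl_cons, pvRunsP]
    by_cases hl : pvStartsAt l = true
    · rw [if_pos hl]
      have hstep : pvStepA (d, cur, cur.getLast?) l = (d, cur ++ [l], (cur ++ [l]).getLast?) := by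
        have hl' : PySem.Str.startswith l "@" = true := hl
        simp only [pvStepA, hl', if_true]
        simp
      rw [hstep]; exact ih d (cur ++ [l])
    · rw [if_neg hl]
      have hl' : PySem.Str.startswith l "@" = false := by
        simpa [pvStartsAt] using hl
      by_cases hc : cur = []
      · subst hc
        have hstep : pvStepA (d, ([] : List String), List.getLast? ([] : List String)) l
            = (d, ([] : List String), List.getLast? ([] : List String)) := by
          simp only [pvStepA, hl', Bool.false_eq_true, if_false, ne_eq, not_true_eq_false]
        rw [hstep, if_pos rfl]
        exact ih d []
      · rw [if_neg hc]
        obtain ⟨r, hr⟩ : ∃ r, cur.getLast? = some r := by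
          cases h : cur.getLast? with
          | none => exact absurd (List.getLast?_eq_none_iff.mp h) hc
          | some r => exact ⟨r, rfl⟩
        have hstep : pvStepA (d, cur, cur.getLast?) l
            = (pvIns d cur, ([] : List String), List.getLast? ([] : List String)) := by
          simp only [pvStepA, hl', Bool.false_eq_true, if_false, ne_eq, hc,
            not_false_iff, if_true, hr, pvIns, PySem.List.pyGet?_neg_one]
          simp
        rw [hstep, List.foldl_cons]
        exact ih (pvIns d cur) []

theorem pvRunsP_char (lines : List String) : ∀ (cur : List String),
    pvRunsP cur lines =
      match lines.dropWhile pvStartsAt with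
      | [] => []
      | _ :: rest =>
        if cur ++ lines.takeWhile pvStartsAt = [] then pvRunsP [] rest
        else (cur ++ lines.takeWhile pvStartsAt) :: pvRunsP [] rest := by
  induction lines with
  | nil => intro cur; rfl
  | cons l rest ih =>
    intro cur
    by_cases hl : pvStartsAt l = true
    · have h1 : pvRunsP cur (l :: rest) = pvRunsP (cur ++ [l]) rest := by
        simp [pvRunsP, hl]
      rw [h1, ih (cur ++ [l])]
      simp only [List.dropWhile_cons, hl, if_true, List.takeWhile_cons, List.append_assoc,
        List.singleton_append]
    · simp only [List.dropWhile_cons, List.takeWhile_cons, hl, Bool.false_eq_true, if_false,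
        List.append_nil]
      by_cases hc : cur = []
      · subst hc
        simp [pvRunsP, hl]
      · simp only [hc]
        simp [pvRunsP, hl, hc]

theorem pvAdvance_eq (lines : List String) : ∀ (fuel j : Nat), lines.length - j ≤ fuel →
    pvAdvance lines lines.length fuel j = j + ((lines.drop j).takeWhile pvStartsAt).length := by
  intro fuel
  induction fuel with
  | zero =>
    intro j hj
    have hdrop : lines.drop j = [] := List.drop_eq_nil_iff.mpr (by omega)
    rw [hdrop]
    simp [pvAdvance]
  | succ m ih =>
    intro j hj
    by_cases hlt : j < lines.length
    · have hdrop : lines.drop j = lines[j] :: lines.drop (j + 1) :=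
        List.drop_eq_getElem_cons hlt
      have hget : lines.getD j "" = lines[j] := List.getD_eq_getElem lines "" hlt
      by_cases hp : pvStartsAt lines[j] = true
      · simp only [pvAdvance]
        rw [if_pos ⟨hlt, by rw [hget]; exact hp⟩]
        rw [ih (j + 1) (by omega), hdrop, List.takeWhile_cons_of_pos hp]
        simp; omega
      · simp only [pvAdvance]
        rw [if_neg (by rw [hget]; exact fun hcon => hp hcon.2), hdrop,
          List.takeWhile_cons_of_neg (by simpa using hp)]
        simp
    · have hdrop : lines.drop j = [] := List.drop_eq_nil_iff.mpr (by omega)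
      simp only [pvAdvance]
      rw [if_neg (fun hcon => hlt hcon.1), hdrop]
      simp

theorem pvScan_eq (lines : List String) : ∀ (fuel i : Nat), lines.length - i ≤ fuel →
    pvScan lines lines.length fuel i = pvRunsP [] (lines.drop i) := by
  intro fuel
  induction fuel with
  | zero =>
    intro i hi
    have hdrop : lines.drop i = [] := List.drop_eq_nil_iff.mpr (by omega)
    rw [hdrop]
    rfl
  | succ m ih =>
    intro i hi
    by_cases hlt : i < lines.length
    · have hdrop : lines.drop i = lines[i] :: lines.drop (i + 1) :=
        List.drop_eq_getElem_cons hlt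
      have hget : lines.getD i "" = lines[i] := List.getD_eq_getElem lines "" hlt
      by_cases hp : pvStartsAt lines[i] = true
      · -- run starting at i
        set t := (lines.drop (i + 1)).takeWhile pvStartsAt with ht
        have hadv : pvAdvance lines lines.length lines.length (i + 1) = i + 1 + t.length :=
          pvAdvance_eq lines lines.length (i + 1) (by omega)
        have htake : (lines.drop (i + 1)).take t.length = t := by
          conv_lhs =>
            rw [← List.takeWhile_append_dropWhile (p := pvStartsAt) (l := lines.drop (i + 1))]
          exact List.take_left
        have hdropj : lines.drop (i + 1 + t.length) = (lines.drop (i + 1)).dropWhile pvStartsAt := by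
          have hsplit : t ++ (lines.drop (i + 1)).dropWhile pvStartsAt = lines.drop (i + 1) :=
            List.takeWhile_append_dropWhile
          calc lines.drop (i + 1 + t.length)
              = (lines.drop (i + 1)).drop t.length := by
                rw [List.drop_drop]
            _ = ((t ++ (lines.drop (i + 1)).dropWhile pvStartsAt)).drop t.length := by
                rw [hsplit]
            _ = (lines.drop (i + 1)).dropWhile pvStartsAt := List.drop_left
        have hslice : PySem.List.slice lines (some (i : Int)) (some ((i + 1 + t.length : Nat) : Int))
            = lines[i] :: t := by
          rw [PySem.List.slice_natCast]
          have : i + 1 + t.length - i = t.length + 1 := by omega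
          rw [this, hdrop, List.take_succ_cons, htake]
        simp only [pvScan]
        rw [if_pos hlt, if_pos (by rw [hget]; exact hp)]
        rw [hadv]
        rw [ih (i + 1 + t.length) (by omega)]
        rw [hslice]
        -- right-hand side via pvRunsP_char
        rw [hdrop]
        have hchar := pvRunsP_char (lines[i] :: lines.drop (i + 1)) ([] : List String)
        rw [hchar]
        simp only [List.dropWhile_cons, hp, if_true, List.takeWhile_cons_of_pos hp,
          List.nil_append]
        rw [← ht, ← hdropj]
        cases hcase : lines.drop (i + 1 + t.length) with
        | nil =>
          have : lines.length ≤ i + 1 + t.length := List.drop_eq_nil_iff.mp hcase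
          rw [if_neg (by omega)]
          simp only [List.nil_append]
          rfl
        | cons x rest2 =>
          have hjlt : i + 1 + t.length < lines.length := by
            by_contra hcon
            rw [List.drop_eq_nil_iff.mpr (by omega)] at hcase
            simp at hcase
          rw [if_pos hjlt]
          have hxp : pvStartsAt x = false := by
            have h2 : (lines.drop (i + 1)).dropWhile pvStartsAt = x :: rest2 := by
              rw [← hdropj, hcase]
            have h3 := List.head?_dropWhile_not pvStartsAt (lines.drop (i + 1))
            rw [h2] at h3
            simpa using h3
          have hx : pvRunsP [] (x :: rest2) = pvRunsP [] rest2 := by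
            simp [pvRunsP, hxp]
          rw [hx]
          simp
      · -- non-@ line at i: skip
        simp only [pvScan]
        rw [if_pos hlt, if_neg (by rw [hget]; exact hp)]
        rw [ih (i + 1) (by omega), hdrop]
        have : pvRunsP [] (lines[i] :: lines.drop (i + 1)) = pvRunsP [] (lines.drop (i + 1)) := by
          simp [pvRunsP, hp]
        rw [this]
    · have hdrop : lines.drop i = [] := List.drop_eq_nil_iff.mpr (by omega)
      simp only [pvScan]
      rw [if_neg (by omega), hdrop]
      rfl

-- ===== VERDICT (by name: the statement is the Claim_ definition above) =====
theorem group_lines_with_at_symbol_spec : Claim_equal_group_lines_with_at_symbol := by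
  intro lines _
  show _ = _
  unfold group_lines_with_at_symbol group_lines_with_at_symbol_alt
  rw [pvScan_eq lines lines.length 0 (by omega)]
  simp only [List.drop_zero]
  have := pvFoldA_eq lines PySem.Dict.empty []
  simp only [List.getLast?_nil] at this
  rw [this]
  rfl
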